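-- pv_equiv track=rewrite | github.com/ArthurKeen/arango-entity-resolution | src/entity_resolution/mcp/tools/advisor.py | _discover_fields
-- ===== SOURCE A (Python) =====
-- from typing import Any, Dict, List, Optional
--
-- def _discover_fields(
--     docs: List[Dict[str, Any]],
--     include_fields: Optional[List[str]],
--     exclude_fields: Optional[List[str]],
-- ) -> List[str]:
--     include = set(include_fields or [])
--     exclude = set(exclude_fields or [])
--     discovered: List[str] = []
--     seen = set()
--     for d in docs:
--         for field in d.keys():
--             if field.startswith("_"):
--                 continue
--             if include and field not in include:
--                 continue
--             if field in exclude: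
--                 continue
--             if field not in seen:
--                 seen.add(field)
--                 discovered.append(field)
--     return discovered
-- ===== SOURCE B (Python) =====
-- from typing import Any, Dict, List, Optional
--
-- def _discover_fields(
--     docs: List[Dict[str, Any]],
--     include_fields: Optional[List[str]],
--     exclude_fields: Optional[List[str]],
-- ) -> List[str]:
--     include = set(include_fields or [])
--     exclude = set(exclude_fields or [])
--     # Index-and-sort instead of streaming dedup: flatten the keys, build a map from
--     # each key to its FIRST occurrence position (walking the positions backwards so
--     # the earliest write wins), filter the distinct keys, and recover the first-seen
--     # order by sorting on that position.
--     keys = [k for d in docs for k in d.keys()]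
--     first = {}
--     for i, k in reversed(list(enumerate(keys))):
--         first[k] = i
--     eligible = [
--         k
--         for k in first
--         if not k.startswith("_")
--         and (not include or k in include)
--         and k not in exclude
--     ]
--     return sorted(eligible, key=first.__getitem__)
-- ===== Notes on version B (the rewrite author's own statement) =====
-- stated objective: alternative
-- what changed: Replaces A's streaming dedup with a maintained seen-set and discovered.append inside nested loops by an index-and-sort pipeline: flatten the keys, build a first-occurrence-position map by overwriting while walking the enumerated keys backwards, filter the distinct keys, and recover first-seen order by sorting on that position instead of by construction.
import Mathlib
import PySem

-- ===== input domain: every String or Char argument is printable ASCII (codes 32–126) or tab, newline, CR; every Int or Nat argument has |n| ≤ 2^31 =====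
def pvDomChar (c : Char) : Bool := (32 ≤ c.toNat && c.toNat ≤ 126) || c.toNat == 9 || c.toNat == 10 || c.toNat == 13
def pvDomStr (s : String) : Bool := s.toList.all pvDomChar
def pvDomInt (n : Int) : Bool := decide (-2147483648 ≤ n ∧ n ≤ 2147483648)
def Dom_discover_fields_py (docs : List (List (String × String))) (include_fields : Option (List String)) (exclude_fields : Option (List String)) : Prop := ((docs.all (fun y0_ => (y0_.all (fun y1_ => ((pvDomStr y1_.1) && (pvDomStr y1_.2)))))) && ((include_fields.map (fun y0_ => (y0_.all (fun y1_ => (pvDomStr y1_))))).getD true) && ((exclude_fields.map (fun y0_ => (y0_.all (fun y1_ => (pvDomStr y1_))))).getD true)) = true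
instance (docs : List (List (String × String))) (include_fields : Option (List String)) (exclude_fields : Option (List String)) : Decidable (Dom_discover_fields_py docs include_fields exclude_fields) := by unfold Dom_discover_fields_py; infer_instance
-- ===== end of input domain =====

-- B replaces A's streaming seen-set dedup by index-and-sort: map each key to its first
-- occurrence position (reverse overwrite), filter the distinct keys, sort by that position.

-- ===== PORT A =====
-- d.keys(): first-occurrence key list of the assoc list (dict keys are unique, insertion order)
def discover_fields_py (docs : List (List (String × String))) (include_fields : Option (List String)) (exclude_fields : Option (List String)) : List String :=
  let incl : PySem.Set String := PySem.Set.ofList (include_fields.getD [])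
  let excl : PySem.Set String := PySem.Set.ofList (exclude_fields.getD [])
  let r := docs.foldl (fun (st : List String × PySem.Set String) d =>
    (PySem.List.dedup (d.map Prod.fst)).foldl (fun st field =>
      if PySem.Str.startswith field "_" then st
      else if !incl.isEmpty && !PySem.Set.contains incl field then st
      else if PySem.Set.contains excl field then st
      else if PySem.Set.contains st.2 field then st
      else (st.1 ++ [field], PySem.Set.add st.2 field)) st) ([], PySem.Set.empty)
  r.1

-- ===== PORT B =====
-- first[k] = i over reversed(list(enumerate(keys))): foldl of Dict.insert over the reversed
-- enumerate; iterating the dict is Dict.keys; first.__getitem__ on a present key is getD (exact here)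
def discover_fields_py_alt (docs : List (List (String × String))) (include_fields : Option (List String)) (exclude_fields : Option (List String)) : List String :=
  let incl : PySem.Set String := PySem.Set.ofList (include_fields.getD [])
  let excl : PySem.Set String := PySem.Set.ofList (exclude_fields.getD [])
  let keys := docs.flatMap (fun d => PySem.List.dedup (d.map Prod.fst))
  let first := ((PySem.List.enumerate keys 0).reverse).foldl
      (fun (d : PySem.Dict String Int) ik => d.insert ik.2 ik.1) PySem.Dict.empty
  let eligible := (PySem.Dict.keys first).filter (fun k =>
      !PySem.Str.startswith k "_" &&
      (incl.isEmpty || PySem.Set.contains incl k) &&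
      !PySem.Set.contains excl k)
  PySem.List.sorted eligible (fun k => PySem.Dict.getD first k 0)

-- ===== PRECONDITION & SPEC =====
def Spec_discover_fields_py (docs : List (List (String × String))) (include_fields : Option (List String)) (exclude_fields : Option (List String)) (out : List String) : Prop := out = discover_fields_py_alt docs include_fields exclude_fields
instance (docs : List (List (String × String))) (include_fields : Option (List String)) (exclude_fields : Option (List String)) (out : List String) : Decidable (Spec_discover_fields_py docs include_fields exclude_fields out) := by unfold Spec_discover_fields_py; infer_instance

-- ===== CLAIM (what is proved, stated in full; the proofs are below) =====
def Claim_equal_discover_fields_py : Prop := ∀ (docs : List (List (String × String))) (include_fields : Option (List String)) (exclude_fields : Option (List String)), Dom_discover_fields_py docs include_fields exclude_fields → Spec_discover_fields_py docs include_fields exclude_fields (discover_fields_py docs include_fields exclude_fields)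

-- ===== LEMMAS AND PROOFS =====

lemma pv_add_mem (s : List String) (k : String) (h : k ∈ s) : PySem.Set.add s k = s := by
  simp [PySem.Set.add, List.contains_eq_mem, h]

lemma pv_add_not_mem (s : List String) (k : String) (h : ¬ k ∈ s) : PySem.Set.add s k = s ++ [k] := by
  simp [PySem.Set.add, List.contains_eq_mem, h]

-- folding Set.add from an accumulator s appends the first-occurrence dedup of the unseen elements
lemma pv_foldl_add : ∀ (n : Nat) (l s : List String), l.length ≤ n →
    l.foldl PySem.Set.add s = s ++ (l.filter (fun x => !decide (x ∈ s))).foldl PySem.Set.add [] := by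
  intro n
  induction n with
  | zero => intro l s h; simp at h; simp [h]
  | succ n ih =>
    intro l s h
    cases l with
    | nil => simp
    | cons k l =>
      simp only [List.foldl_cons, List.filter_cons]
      by_cases hk : k ∈ s
      · rw [pv_add_mem s k hk]
        simp only [hk, decide_true, Bool.not_true, Bool.false_eq_true, if_false]
        exact ih l s (by simpa using h)
      · rw [pv_add_not_mem s k hk]
        simp only [hk, decide_false, Bool.not_false, if_true]
        rw [ih l (s ++ [k]) (by simpa using h)]
        rw [List.foldl_cons, pv_add_not_mem [] k (by simp), List.nil_append]
        rw [ih (l.filter (fun x => !decide (x ∈ s))) [k] (le_trans (List.length_filter_le _ _) (by simpa using h))]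
        rw [List.filter_filter]
        simp only [List.append_assoc, List.singleton_append]
        congr 2
        apply congrArg
        apply List.filter_congr
        intro x _
        simp [Bool.and_comm]

-- first-occurrence dedup, cons equation
lemma pv_dedup_cons (k : String) (m : List String) :
    PySem.List.dedup (k :: m) = k :: PySem.List.dedup (m.filter (fun x => !decide (x = k))) := by
  simp only [PySem.List.dedup, PySem.Set.ofList_eq_foldl]
  rw [List.foldl_cons, pv_add_not_mem [] k (by simp), List.nil_append,
      pv_foldl_add m.length m [k] le_rfl]
  simp

-- dropping later occurrences of an ineligible key does not change the filtered dedup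
lemma pv_dedup_drop (p : String → Bool) (k : String) (hp : p k = false) :
    ∀ (n : Nat) (m : List String), m.length ≤ n →
    (PySem.List.dedup (m.filter (fun x => !decide (x = k)))).filter p
      = (PySem.List.dedup m).filter p := by
  intro n
  induction n with
  | zero => intro m h; simp at h; simp [h]
  | succ n ih =>
    intro m h
    cases m with
    | nil => simp
    | cons a m =>
      by_cases hak : a = k
      · subst hak
        rw [List.filter_cons_of_neg (by simp), pv_dedup_cons a m, List.filter_cons_of_neg (by simp [hp])]
      · rw [List.filter_cons_of_pos (by simp [hak]), pv_dedup_cons a, pv_dedup_cons a m,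
            List.filter_filter]
        have hcomm : (m.filter (fun x => !decide (x = k))).filter (fun x => !decide (x = a))
            = (m.filter (fun x => !decide (x = a))).filter (fun x => !decide (x = k)) := by
          rw [List.filter_filter, List.filter_filter]
          exact List.filter_congr (fun x _ => Bool.and_comm _ _)
        rw [show (List.filter (fun a_1 => !decide (a_1 = a) && !decide (a_1 = k)) m)
              = (m.filter (fun x => !decide (x = k))).filter (fun x => !decide (x = a)) from by
              rw [List.filter_filter]]
        rw [hcomm]
        cases hpa : p a with
        | false =>
          rw [List.filter_cons_of_neg (by simp [hpa]), List.filter_cons_of_neg (by simp [hpa])]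
          exact ih _ (le_trans (List.length_filter_le _ _) (by simpa using h))
        | true =>
          rw [List.filter_cons_of_pos (by simp [hpa]), List.filter_cons_of_pos (by simp [hpa])]
          rw [ih _ (le_trans (List.length_filter_le _ _) (by simpa using h))]

-- canonical form of A's inner step, for a fixed eligibility predicate p
def pvStep (p : String → Bool) : (List String × List String) → String → (List String × List String) :=
  fun st k => if p k then (if st.2.contains k then st else (st.1 ++ [k], st.2 ++ [k])) else st

-- loop invariant for A's flattened loop: seen = discovered, and the tail contributes
-- the filtered dedup of its not-yet-seen keys
lemma pv_loop (p : String → Bool) :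
    ∀ (n : Nat) (ks disc : List String), ks.length ≤ n →
    ks.foldl (pvStep p) (disc, disc) =
      (disc ++ (PySem.List.dedup (ks.filter (fun x => !decide (x ∈ disc)))).filter p,
       disc ++ (PySem.List.dedup (ks.filter (fun x => !decide (x ∈ disc)))).filter p) := by
  intro n
  induction n with
  | zero => intro ks disc h; simp at h; simp [h, PySem.List.dedup, PySem.Set.ofList_eq_foldl]
  | succ n ih =>
    intro ks disc h
    cases ks with
    | nil => simp [PySem.List.dedup, PySem.Set.ofList_eq_foldl]
    | cons k ks =>
      rw [List.foldl_cons]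
      by_cases hm : k ∈ disc
      · have hstep : pvStep p (disc, disc) k = (disc, disc) := by
          unfold pvStep
          simp [List.contains_eq_mem, hm]
        rw [hstep, List.filter_cons_of_neg (by simp [hm]), ih ks disc (by simpa using h)]
      · by_cases hp : p k = true
        · have hstep : pvStep p (disc, disc) k = (disc ++ [k], disc ++ [k]) := by
            unfold pvStep
            simp [List.contains_eq_mem, hm, hp]
          rw [hstep, ih ks (disc ++ [k]) (by simpa using h),
              List.filter_cons_of_pos (by simp [hm]), pv_dedup_cons,
              List.filter_cons_of_pos (by simp [hp])]
          have hff : (ks.filter (fun x => !decide (x ∈ disc))).filter (fun x => !decide (x = k))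
              = ks.filter (fun x => !decide (x ∈ disc ++ [k])) := by
            rw [List.filter_filter]
            apply List.filter_congr
            intro x _
            simp [List.mem_append, Bool.and_comm]
          rw [hff]
          simp
        · have hstep : pvStep p (disc, disc) k = (disc, disc) := by
            unfold pvStep
            simp [hp]
          rw [hstep, ih ks disc (by simpa using h),
              List.filter_cons_of_pos (by simp [hm]), pv_dedup_cons,
              List.filter_cons_of_neg (by simp [hp]),
              pv_dedup_drop p k (by simpa using hp) (ks.filter (fun x => !decide (x ∈ disc))).length _ le_rfl]

-- A's concrete step function is pvStep of the eligibility predicate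
lemma pv_step_eq (incl excl : List String) (st : List String × List String) (field : String) :
    (if PySem.Str.startswith field "_" then st
     else if !incl.isEmpty && !PySem.Set.contains incl field then st
     else if PySem.Set.contains excl field then st
     else if PySem.Set.contains st.2 field then st
     else (st.1 ++ [field], PySem.Set.add st.2 field))
    = pvStep (fun f => !PySem.Str.startswith f "_" &&
        (incl.isEmpty || PySem.Set.contains incl f) && !PySem.Set.contains excl f) st field := by
  unfold pvStep PySem.Set.add PySem.Set.contains
  beta_reduce
  generalize PySem.Str.startswith field "_" = b1
  generalize incl.isEmpty = b2
  generalize List.contains incl field = b3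
  generalize List.contains excl field = b4
  generalize List.contains st.2 field = b5
  cases b1 <;> cases b2 <;> cases b3 <;> cases b4 <;> cases b5 <;> simp

-- B's positional selection over a split done ++ rest equals the filtered first-occurrence
-- dedup of the keys of rest that do not already occur in done
lemma pv_sel (p : String → Bool) :
    ∀ (rest done : List String),
    ((PySem.List.enumerate rest ((done.length : Int))).filter (fun ik =>
        p ik.2 && ((PySem.List.index? (done ++ rest) ik.2).map (fun n => (n : Int)) == some ik.1))).map Prod.snd
      = (PySem.List.dedup (rest.filter (fun x => !decide (x ∈ done)))).filter p := by
  intro rest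
  induction rest with
  | nil => intro done; simp [PySem.List.enumerate_nil, PySem.List.dedup, PySem.Set.ofList_eq_foldl]
  | cons k rest ih =>
    intro done
    rw [PySem.List.enumerate_cons]
    by_cases hm : k ∈ done
    · -- k occurred before: index? points inside done, the position test fails
      have hidx : PySem.List.index? (done ++ k :: rest) k = PySem.List.index? done k :=
        PySem.List.index?_append_of_mem (k :: rest) hm
      obtain ⟨j, hj⟩ : ∃ j, PySem.List.index? done k = some j := by
        have := (PySem.List.index?_isSome_iff done k).mpr hm
        exact Option.isSome_iff_exists.mp this
      obtain ⟨hjlt, -, -⟩ := PySem.List.getElem_of_index?_eq_some hj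
      have hidx' : List.idxOf? k (done ++ k :: rest) = some j := by
        rw [← PySem.List.index?_eq_idxOf?, hidx, hj]
      rw [List.filter_cons_of_neg (by
        have : ((j : Int)) ≠ ((done.length : Int)) := by exact_mod_cast Nat.ne_of_lt hjlt
        simp [hidx', this])]
      have htl : done ++ k :: rest = (done ++ [k]) ++ rest := by simp
      have hlen : ((done.length : Int)) + 1 = (((done ++ [k]).length : Nat) : Int) := by
        simp
      rw [hlen, htl, ih (done ++ [k])]
      have hfe : rest.filter (fun x => !decide (x ∈ done ++ [k]))
          = rest.filter (fun x => !decide (x ∈ done)) := by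
        apply List.filter_congr
        intro x _
        by_cases hx : x = k
        · subst hx; simp [hm]
        · simp [List.mem_append, hx]
      rw [hfe, List.filter_cons_of_neg (by simp [hm])]
    · -- first occurrence of k: the position test holds; it is emitted iff p k
      have hidx : PySem.List.index? (done ++ k :: rest) k = some done.length := by
        rw [PySem.List.index?_eq_some_iff]
        exact ⟨done, rest, rfl, rfl, hm⟩
      have hidx' : List.idxOf? k (done ++ k :: rest) = some done.length := by
        rw [← PySem.List.index?_eq_idxOf?, hidx]
      have htl : done ++ k :: rest = (done ++ [k]) ++ rest := by simp
      have hlen : ((done.length : Int)) + 1 = (((done ++ [k]).length : Nat) : Int) := by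
        simp
      have hrest : ((PySem.List.enumerate rest ((done.length : Int) + 1)).filter (fun ik =>
          p ik.2 && ((PySem.List.index? (done ++ k :: rest) ik.2).map (fun n => (n : Int)) == some ik.1))).map Prod.snd
          = (PySem.List.dedup (rest.filter (fun x => !decide (x ∈ done ++ [k])))).filter p := by
        rw [hlen, htl, ih (done ++ [k])]
      have hded : PySem.List.dedup ((k :: rest).filter (fun x => !decide (x ∈ done)))
          = k :: PySem.List.dedup (rest.filter (fun x => !decide (x ∈ done ++ [k]))) := by
        rw [List.filter_cons_of_pos (by simp [hm]), pv_dedup_cons]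
        congr 1
        apply congrArg
        rw [List.filter_filter]
        apply List.filter_congr
        intro x _
        simp [List.mem_append, Bool.and_comm]
      cases hp : p k with
      | true =>
        rw [List.filter_cons_of_pos (by simp [hp, hidx']), List.map_cons, hrest, hded,
            List.filter_cons_of_pos (by simp [hp])]
      | false =>
        rw [List.filter_cons_of_neg (by simp [hp]), hrest, hded,
            List.filter_cons_of_neg (by simp [hp])]

-- the dict built by the reversed-enumerate loop, named for the proofs
def pvFirst (keys : List String) : PySem.Dict String Int :=
  ((PySem.List.enumerate keys 0).reverse).foldl
    (fun (d : PySem.Dict String Int) ik => d.insert ik.2 ik.1) PySem.Dict.empty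

lemma pv_find_enum (xs : List String) (k : String) :
    ∀ (s : Int), (PySem.List.enumerate xs s).find? (fun ik => ik.2 == k)
      = (PySem.List.index? xs k).map (fun n => (s + (n : Int), k)) := by
  induction xs with
  | nil => intro s; simp [PySem.List.enumerate_nil]
  | cons x xs ih =>
    intro s
    rw [PySem.List.enumerate_cons]
    by_cases hk : x = k
    · subst hk
      rw [List.find?_cons_of_pos (by simp)]
      rw [PySem.List.index?_cons_self]
      simp
    · rw [List.find?_cons_of_neg (by simp [hk]), ih (s + 1)]
      rw [PySem.List.index?_cons_of_ne _ hk]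
      cases h : PySem.List.index? xs k with
      | none => simp
      | some n => simp [Prod.ext_iff]; omega

lemma pv_fold_get? (l : List (Int × String)) (k : String) :
    ∀ (d : PySem.Dict String Int),
    (l.foldl (fun d ik => d.insert ik.2 ik.1) d).get? k
      = match l.reverse.find? (fun ik => ik.2 == k) with
        | some ik => some ik.1
        | none => d.get? k := by
  induction l with
  | nil => intro d; simp
  | cons p t ih =>
    intro d
    rw [List.foldl_cons, ih]
    rw [List.reverse_cons, List.find?_append]
    cases h : t.reverse.find? (fun ik => ik.2 == k) with
    | some ik => simp
    | none =>
      by_cases hk : p.2 = k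
      · simp [List.find?, hk]
      · have hk' : k ≠ p.2 := fun he => hk he.symm
        have hbk : (p.2 == k) = false := by simp [hk]
        simp [List.find?, hbk, PySem.Dict.get?_insert, hk']

lemma pv_first_get? (keys : List String) (k : String) :
    (pvFirst keys).get? k = (PySem.List.index? keys k).map (fun n => (n : Int)) := by
  unfold pvFirst
  rw [pv_fold_get?, List.reverse_reverse, pv_find_enum keys k 0]
  cases h : PySem.List.index? keys k <;> simp

lemma pv_first_keys (keys : List String) :
    (pvFirst keys).keys = PySem.Set.ofList keys.reverse := by
  unfold pvFirst
  rw [PySem.Dict.keys_foldl_insert_key ((PySem.List.enumerate keys 0).reverse)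
        (fun ik => ik.2) (fun _ ik => ik.1) PySem.Dict.empty]
  rw [List.map_reverse, PySem.List.map_snd_enumerate]
  simp [PySem.Set.update_nil_left]

lemma pv_dedup_eq_sel (keys : List String) :
    ((PySem.List.enumerate keys 0).filter (fun ik =>
        (PySem.List.index? keys ik.2).map (fun n => (n : Int)) == some ik.1)).map Prod.snd
      = PySem.List.dedup keys := by
  simpa using pv_sel (fun _ => true) keys []

lemma pv_perm (keys : List String) :
    (PySem.List.dedup keys).Perm (PySem.Set.ofList keys.reverse) := by
  have hd : PySem.List.dedup keys = PySem.Set.ofList keys := rfl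
  rw [hd]
  apply List.perm_of_nodup_nodup_toFinset_eq (PySem.Set.nodup_ofList keys)
    (PySem.Set.nodup_ofList keys.reverse)
  ext a
  simp [PySem.Set.mem_ofList]

lemma pv_pairwise (keys : List String) :
    (PySem.List.dedup keys).Pairwise (fun a b =>
      PySem.Dict.getD (pvFirst keys) a 0 < PySem.Dict.getD (pvFirst keys) b 0) := by
  rw [← pv_dedup_eq_sel keys, List.pairwise_map]
  apply List.Pairwise.imp_of_mem ?_ (List.Pairwise.filter _ (PySem.List.pairwise_lt_enumerate keys 0))
  intro a b ha hb hab
  have hca : (PySem.List.index? keys a.2).map (fun n => (n : Int)) = some a.1 := by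
    simpa using (List.mem_filter.mp ha).2
  have hcb : (PySem.List.index? keys b.2).map (fun n => (n : Int)) = some b.1 := by
    simpa using (List.mem_filter.mp hb).2
  have hga : PySem.Dict.getD (pvFirst keys) a.2 0 = a.1 := by
    rw [PySem.Dict.getD_eq_get?_getD, pv_first_get?, hca]; rfl
  have hgb : PySem.Dict.getD (pvFirst keys) b.2 0 = b.1 := by
    rw [PySem.Dict.getD_eq_get?_getD, pv_first_get?, hcb]; rfl
  rw [hga, hgb]
  exact hab

theorem pv_main (docs : List (List (String × String))) (include_fields : Option (List String)) (exclude_fields : Option (List String)) :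
    discover_fields_py docs include_fields exclude_fields
      = discover_fields_py_alt docs include_fields exclude_fields := by
  unfold discover_fields_py discover_fields_py_alt
  simp only []
  rw [← List.foldl_flatMap]
  rw [funext fun st => funext fun field =>
        pv_step_eq (PySem.Set.ofList (include_fields.getD [])) (PySem.Set.ofList (exclude_fields.getD [])) st field]
  rw [show (([], PySem.Set.empty) : List String × PySem.Set String) = (([], []) : List String × List String) from rfl]
  rw [pv_loop _ _ _ [] le_rfl]
  have hF : ((PySem.List.enumerate (docs.flatMap fun d => PySem.List.dedup (d.map Prod.fst)) 0).reverse).foldl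
      (fun (d : PySem.Dict String Int) ik => d.insert ik.2 ik.1) PySem.Dict.empty
      = pvFirst (docs.flatMap fun d => PySem.List.dedup (d.map Prod.fst)) := rfl
  rw [hF]
  rw [PySem.List.sorted_eq_of_perm_of_pairwise_lt _
        (List.filter (fun f => !PySem.Str.startswith f "_" &&
          ((PySem.Set.ofList (include_fields.getD [])).isEmpty || PySem.Set.contains (PySem.Set.ofList (include_fields.getD [])) f) &&
          !PySem.Set.contains (PySem.Set.ofList (exclude_fields.getD [])) f)
          (PySem.List.dedup (docs.flatMap fun d => PySem.List.dedup (d.map Prod.fst)))) _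
        (List.Perm.filter _ (by rw [pv_first_keys]; exact pv_perm _))
        (List.Pairwise.filter _ (pv_pairwise _))]
  simp

-- ===== VERDICT (by name: the statement is the Claim_ definition above) =====
theorem discover_fields_py_spec : Claim_equal_discover_fields_py := by
  intro docs include_fields exclude_fields _
  unfold Spec_discover_fields_py
  exact pv_main docs include_fields exclude_fields
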